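-- pv_equiv track=rewrite | github.com/ryaneveson/COSC490FinalProject | P_Z/step6_grading.py | get_complexity_bonus
-- ===== SOURCE A (Python) =====
-- COMPLEXITY_BONUSES = {
--     "length": {
--         8: 5,
--         10: 10,
--         12: 15,
--         14: 20,
--         16: 25,
--     },
--     "charsets": {
--         1: 0,   # Only one type
--         2: 5,   # Two types
--         3: 15,  # Three types
--         4: 25,  # All four types (upper, lower, digit, special)
--     }
-- }
--
-- def get_complexity_bonus(password: str) -> int:
--     """Calculate complexity bonus based on length and character variety"""
--     bonus = 0
--
--     # Length bonus
--     length = len(password)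
--     for min_len, bonus_val in COMPLEXITY_BONUSES["length"].items():
--         if length >= min_len:
--             bonus = max(bonus, bonus_val)
--
--     # Character set bonus
--     charsets = 0
--     if any(c.isupper() for c in password):
--         charsets += 1
--     if any(c.islower() for c in password):
--         charsets += 1
--     if any(c.isdigit() for c in password):
--         charsets += 1
--     if any(not c.isalnum() for c in password):
--         charsets += 1
--
--     bonus += COMPLEXITY_BONUSES["charsets"].get(charsets, 0)
--
--     return bonus
-- ===== SOURCE B (Python) =====
-- def get_complexity_bonus(password: str) -> int:
--     """Calculate complexity bonus based on length and character variety"""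
--     # Length bonus: closed form equivalent to the threshold table
--     # (8->5, 10->10, 12->15, 14->20, 16->25)
--     length = len(password)
--     length_bonus = 5 * min(max(length - 6, 0) // 2, 5)
--
--     # Character set bonus: one pass over the password setting four flags
--     has_u = has_l = has_d = has_s = False
--     for c in password:
--         has_u = has_u or c.isupper()
--         has_l = has_l or c.islower()
--         has_d = has_d or c.isdigit()
--         has_s = has_s or (not c.isalnum())
--
--     n = has_u + has_l + has_d + has_s
--     if n == 4:
--         charset_bonus = 25
--     elif n == 3:
--         charset_bonus = 15
--     elif n == 2:
--         charset_bonus = 5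
--     else:
--         charset_bonus = 0
--     return length_bonus + charset_bonus
-- ===== Notes on version B (the rewrite author's own statement) =====
-- stated objective: faster
-- what changed: B replaces A's loop over the length-threshold table with the closed-form formula 5*min(max(len-6,0)//2,5) and replaces A's four separate any()-scans plus dict lookup with a single pass over the password maintaining four flags and an if-chain for the charset bonus.
import Mathlib
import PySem

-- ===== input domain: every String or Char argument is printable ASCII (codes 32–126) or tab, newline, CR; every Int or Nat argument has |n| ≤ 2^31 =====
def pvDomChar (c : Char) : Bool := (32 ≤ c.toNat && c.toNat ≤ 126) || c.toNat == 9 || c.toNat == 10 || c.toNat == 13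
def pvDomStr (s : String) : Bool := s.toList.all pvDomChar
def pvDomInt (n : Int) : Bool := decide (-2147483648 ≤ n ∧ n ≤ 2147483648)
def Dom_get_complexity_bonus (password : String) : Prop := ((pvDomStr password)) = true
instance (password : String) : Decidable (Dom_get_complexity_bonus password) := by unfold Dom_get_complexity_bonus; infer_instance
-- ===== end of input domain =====

-- B replaces the length-table loop with a closed-form formula and the four any()-scans
-- plus dict lookup with one pass over the password setting four flags (objective: alternative).

-- ===== PORT A =====
-- COMPLEXITY_BONUSES["length"].items() and COMPLEXITY_BONUSES["charsets"]
def pvLengthTable : List (Int × Int) := [(8, 5), (10, 10), (12, 15), (14, 20), (16, 25)]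
def pvCharsetTable : PySem.Dict Int Int := PySem.Dict.ofList [(1, 0), (2, 5), (3, 15), (4, 25)]

def get_complexity_bonus (password : String) : Int :=
  let cs := password.toList
  let length : Int := cs.length
  let bonus : Int := pvLengthTable.foldl
    (fun b p => if length ≥ p.1 then max b p.2 else b) 0
  let charsets : Int := 0
  let charsets := if cs.any (fun c => PySem.Chars.isupper c) then charsets + 1 else charsets
  let charsets := if cs.any (fun c => PySem.Chars.islower c) then charsets + 1 else charsets
  let charsets := if cs.any (fun c => PySem.Chars.isdigit c) then charsets + 1 else charsets
  let charsets := if cs.any (fun c => !PySem.Chars.isalnum c) then charsets + 1 else charsets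
  bonus + pvCharsetTable.getD charsets 0

-- ===== PORT B =====
def get_complexity_bonus_alt (password : String) : Int :=
  let cs := password.toList
  let length : Int := cs.length
  let lengthBonus : Int := 5 * min (PySem.Int.floordiv (max (length - 6) 0) 2) 5
  let flags := cs.foldl
    (fun (f : Bool × Bool × Bool × Bool) c =>
      (f.1 || PySem.Chars.isupper c,
       f.2.1 || PySem.Chars.islower c,
       f.2.2.1 || PySem.Chars.isdigit c,
       f.2.2.2 || !PySem.Chars.isalnum c))
    (false, false, false, false)
  let n : Int := (if flags.1 then 1 else 0) + (if flags.2.1 then 1 else 0)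
               + (if flags.2.2.1 then 1 else 0) + (if flags.2.2.2 then 1 else 0)
  let charsetBonus : Int := if n == 4 then 25 else if n == 3 then 15 else if n == 2 then 5 else 0
  lengthBonus + charsetBonus

-- ===== PRECONDITION & SPEC =====
def Spec_get_complexity_bonus (password : String) (out : Int) : Prop := out = get_complexity_bonus_alt password
instance (password : String) (out : Int) : Decidable (Spec_get_complexity_bonus password out) := by unfold Spec_get_complexity_bonus; infer_instance

-- ===== CLAIM (what is proved, stated in full; the proofs are below) =====
def Claim_equal_get_complexity_bonus : Prop := ∀ (password : String), Dom_get_complexity_bonus password → Spec_get_complexity_bonus password (get_complexity_bonus password)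

-- ===== LEMMAS AND PROOFS =====

-- B's one-pass flag fold computes the four any-scans
theorem pv_flags_eq (cs : List Char) (f : Bool × Bool × Bool × Bool) :
    cs.foldl
      (fun (f : Bool × Bool × Bool × Bool) c =>
        (f.1 || PySem.Chars.isupper c,
         f.2.1 || PySem.Chars.islower c,
         f.2.2.1 || PySem.Chars.isdigit c,
         f.2.2.2 || !PySem.Chars.isalnum c)) f
    = (f.1 || cs.any (fun c => PySem.Chars.isupper c),
       f.2.1 || cs.any (fun c => PySem.Chars.islower c),
       f.2.2.1 || cs.any (fun c => PySem.Chars.isdigit c),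
       f.2.2.2 || cs.any (fun c => !PySem.Chars.isalnum c)) := by
  induction cs generalizing f with
  | nil => simp
  | cons c cs ih =>
    simp [List.foldl_cons, ih, Bool.or_assoc]

-- A's length-table loop equals B's closed form
theorem pv_length_eq (length : Int) (h : 0 ≤ length) :
    pvLengthTable.foldl (fun b p => if length ≥ p.1 then max b p.2 else b) (0 : Int)
    = 5 * min (PySem.Int.floordiv (max (length - 6) 0) 2) 5 := by
  rw [PySem.Int.floordiv_eq_ediv_of_pos (by omega)]
  simp only [pvLengthTable, List.foldl_cons, List.foldl_nil]
  split_ifs <;> omega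

-- ===== VERDICT (by name: the statement is the Claim_ definition above) =====
theorem get_complexity_bonus_spec : Claim_equal_get_complexity_bonus := by
  intro password _
  unfold Spec_get_complexity_bonus get_complexity_bonus get_complexity_bonus_alt
  simp only [pv_flags_eq, Bool.false_or]
  rw [pv_length_eq _ (by positivity)]
  cases h1 : password.toList.any (fun c => PySem.Chars.isupper c) <;>
  cases h2 : password.toList.any (fun c => PySem.Chars.islower c) <;>
  cases h3 : password.toList.any (fun c => PySem.Chars.isdigit c) <;>
  cases h4 : password.toList.any (fun c => !PySem.Chars.isalnum c) <;>
    simp [pvCharsetTable, PySem.Dict.ofList, PySem.Dict.getD] <;> decide
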